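-- pv_equiv track=rewrite | github.com/Zilatiel/Projekt-Netzwerke-und-Metaheuristiken | main1.py | is_forward_edge
-- ===== SOURCE A (Python) =====
-- def is_forward_edge(edge, cycle_nodes):
--     for i in range(len(cycle_nodes) - 1):
--         if edge == (cycle_nodes[i], cycle_nodes[i + 1]):
--             return True
--         if edge == (cycle_nodes[i + 1], cycle_nodes[i]):
--             return False
--     if edge == (cycle_nodes[-1], cycle_nodes[0]):
--         return True
--     if edge == (cycle_nodes[0], cycle_nodes[-1]):
--         return False
--     return False
-- ===== SOURCE B (Python) =====
-- def is_forward_edge(edge, cycle_nodes):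
--     pairs = list(zip(cycle_nodes, cycle_nodes[1:]))
--     n = len(pairs)
--     try:
--         f = pairs.index(edge)
--     except ValueError:
--         f = n
--     try:
--         b = pairs.index(edge[::-1])
--     except ValueError:
--         b = n
--     if f < n or b < n:
--         return f <= b
--     return edge == (cycle_nodes[-1], cycle_nodes[0])
-- ===== Notes on version B (the rewrite author's own statement) =====
-- stated objective: alternative
-- what changed: B replaces A's single interleaved scan with early returns by two staged whole-list searches (first index of the edge and of its reverse among adjacent pairs via list.index) followed by a numeric comparison f <= b, and a single equality test for the wrap pair.
import Mathlib
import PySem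

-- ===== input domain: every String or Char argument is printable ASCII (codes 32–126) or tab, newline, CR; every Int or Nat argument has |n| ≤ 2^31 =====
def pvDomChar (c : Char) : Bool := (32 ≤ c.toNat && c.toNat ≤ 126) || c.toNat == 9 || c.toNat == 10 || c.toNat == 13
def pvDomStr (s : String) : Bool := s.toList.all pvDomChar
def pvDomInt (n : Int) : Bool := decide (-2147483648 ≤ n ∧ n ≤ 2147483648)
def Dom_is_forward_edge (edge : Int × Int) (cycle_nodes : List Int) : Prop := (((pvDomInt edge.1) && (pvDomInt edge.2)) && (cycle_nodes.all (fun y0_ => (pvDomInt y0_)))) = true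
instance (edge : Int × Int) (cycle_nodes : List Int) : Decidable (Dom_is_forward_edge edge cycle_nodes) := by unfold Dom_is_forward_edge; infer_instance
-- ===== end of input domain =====

-- B replaces A's interleaved early-return scan with two staged list.index searches
-- and an index comparison (alternative decomposition; same cost).

-- ===== PORT A =====
-- the 'for i in range(len(cycle_nodes) - 1)' loop with its two early returns
def pvAGo (edge : Int × Int) (cs : List Int) (i : Nat) : Option Bool :=
  if _h : i < cs.length - 1 then
    if edge = (cs.getD i 0, cs.getD (i + 1) 0) then some true
    else if edge = (cs.getD (i + 1) 0, cs.getD i 0) then some false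
    else pvAGo edge cs (i + 1)
  else none
termination_by cs.length - 1 - i

def is_forward_edge (edge : Int × Int) (cycle_nodes : List Int) : Bool :=
  match pvAGo edge cycle_nodes 0 with
  | some b => b
  | none =>
    -- cycle_nodes[-1] / cycle_nodes[0]: none = IndexError (empty list, excluded by Pre_)
    match PySem.List.pyGet? cycle_nodes (-1) with
    | none => false
    | some last =>
      match PySem.List.pyGet? cycle_nodes 0 with
      | none => false
      | some first =>
        if edge = (last, first) then true
        else if edge = (first, last) then false
        else false

-- ===== PORT B =====
def is_forward_edge_alt (edge : Int × Int) (cycle_nodes : List Int) : Bool :=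
  let pairs := cycle_nodes.zip (PySem.List.slice cycle_nodes (some 1) none)
  let n := pairs.length
  -- try: pairs.index(edge) except ValueError: f = n
  let f := match PySem.List.index? pairs edge with | some i => i | none => n
  -- try: pairs.index(edge[::-1]) except ValueError: b = n
  let b := match PySem.List.index? pairs (edge.2, edge.1) with | some i => i | none => n
  if f < n ∨ b < n then decide (f ≤ b)
  else
    -- edge == (cycle_nodes[-1], cycle_nodes[0]); none = IndexError (empty list, excluded by Pre_)
    match PySem.List.pyGet? cycle_nodes (-1), PySem.List.pyGet? cycle_nodes 0 with
    | some last, some first => decide (edge = (last, first))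
    | _, _ => false

-- ===== PRECONDITION & SPEC =====
-- A (and B) raise IndexError on an empty cycle (cycle_nodes[-1]); that is all Pre_ excludes.
def Pre_is_forward_edge (edge : Int × Int) (cycle_nodes : List Int) : Prop := cycle_nodes ≠ []
instance (edge : Int × Int) (cycle_nodes : List Int) : Decidable (Pre_is_forward_edge edge cycle_nodes) := by unfold Pre_is_forward_edge; infer_instance
def pvWitness_is_forward_edge : (Int × Int) × List Int := ((1, 2), [1, 2, 3])

def Spec_is_forward_edge (edge : Int × Int) (cycle_nodes : List Int) (out : Bool) : Prop := out = is_forward_edge_alt edge cycle_nodes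
instance (edge : Int × Int) (cycle_nodes : List Int) (out : Bool) : Decidable (Spec_is_forward_edge edge cycle_nodes out) := by unfold Spec_is_forward_edge; infer_instance

-- ===== CLAIM (what is proved, stated in full; the proofs are below) =====
def Claim_equal_is_forward_edge : Prop := ∀ (edge : Int × Int) (cycle_nodes : List Int), Dom_is_forward_edge edge cycle_nodes → Pre_is_forward_edge edge cycle_nodes → Spec_is_forward_edge edge cycle_nodes (is_forward_edge edge cycle_nodes)

-- ===== LEMMAS AND PROOFS =====

-- the combined outcome of the two first-match searches over a pair list
def pvRes (edge : Int × Int) (P : List (Int × Int)) : Option Bool :=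
  match PySem.List.index? P edge, PySem.List.index? P (edge.2, edge.1) with
  | none, none => none
  | some _, none => some true
  | none, some _ => some false
  | some f, some b => some (decide (f ≤ b))

theorem pvRes_cons (edge p : Int × Int) (P : List (Int × Int)) :
    pvRes edge (p :: P) =
      if edge = p then some true
      else if (edge.2, edge.1) = p then some false
      else pvRes edge P := by
  by_cases h1 : edge = p
  · subst h1
    rw [if_pos rfl]
    unfold pvRes
    rw [PySem.List.index?_cons_self]
    by_cases h2 : edge = (edge.2, edge.1)
    · conv_lhs => rw [← h2, PySem.List.index?_cons_self]
      simp
    · rw [PySem.List.index?_cons_of_ne _ h2]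
      cases PySem.List.index? P (edge.2, edge.1) <;> simp
  · rw [if_neg h1]
    by_cases h2 : (edge.2, edge.1) = p
    · subst h2
      rw [if_pos rfl]
      unfold pvRes
      rw [PySem.List.index?_cons_self, PySem.List.index?_cons_of_ne _ (fun hh => h1 hh.symm)]
      cases PySem.List.index? P edge <;> simp
    · rw [if_neg h2]
      unfold pvRes
      rw [PySem.List.index?_cons_of_ne _ (fun hh => h1 hh.symm),
        PySem.List.index?_cons_of_ne _ (fun hh => h2 hh.symm)]
      cases PySem.List.index? P edge <;>
        cases PySem.List.index? P (edge.2, edge.1) <;> simp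

theorem pvAGo_eq (edge : Int × Int) (cs : List Int) (i : Nat) :
    pvAGo edge cs i = pvRes edge ((cs.zip cs.tail).drop i) := by
  fun_induction pvAGo edge cs i with
  | case1 i h h1 =>
    have hz : i < (cs.zip cs.tail).length := by
      simp [List.length_zip, List.length_tail]; omega
    rw [List.drop_eq_getElem_cons hz, pvRes_cons]
    have hi : i < cs.length := by omega
    have hi1 : i + 1 < cs.length := by omega
    have hgz : (cs.zip cs.tail)[i] = (cs.getD i 0, cs.getD (i+1) 0) := by
      simp [List.getElem_zip, List.getElem_tail, List.getD_eq_getElem, hi, hi1]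
    rw [hgz, if_pos h1]
  | case2 i h h1 h2 =>
    have hz : i < (cs.zip cs.tail).length := by
      simp [List.length_zip, List.length_tail]; omega
    rw [List.drop_eq_getElem_cons hz, pvRes_cons]
    have hi : i < cs.length := by omega
    have hi1 : i + 1 < cs.length := by omega
    have hgz : (cs.zip cs.tail)[i] = (cs.getD i 0, cs.getD (i+1) 0) := by
      simp [List.getElem_zip, List.getElem_tail, List.getD_eq_getElem, hi, hi1]
    have hswap : (edge.2, edge.1) = (cs.getD i 0, cs.getD (i+1) 0) := by
      obtain ⟨e1, e2⟩ := edge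
      simp at h2 ⊢
      tauto
    rw [hgz, if_neg h1, if_pos hswap]
  | case3 i h h1 h2 ih =>
    have hz : i < (cs.zip cs.tail).length := by
      simp [List.length_zip, List.length_tail]; omega
    rw [List.drop_eq_getElem_cons hz, pvRes_cons]
    have hi : i < cs.length := by omega
    have hi1 : i + 1 < cs.length := by omega
    have hgz : (cs.zip cs.tail)[i] = (cs.getD i 0, cs.getD (i+1) 0) := by
      simp [List.getElem_zip, List.getElem_tail, List.getD_eq_getElem, hi, hi1]
    have hswap : ¬ (edge.2, edge.1) = (cs.getD i 0, cs.getD (i+1) 0) := by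
      obtain ⟨e1, e2⟩ := edge
      simp at h2 ⊢
      tauto
    rw [hgz, if_neg h1, if_neg hswap, ih]
  | case4 i h =>
    have hz : (cs.zip cs.tail).length ≤ i := by
      simp [List.length_zip, List.length_tail]; omega
    rw [List.drop_eq_nil_of_le hz]
    simp [pvRes, PySem.List.index?_eq_idxOf?]

theorem pv_idx_lt (P : List (Int × Int)) (v : Int × Int) (k : Nat)
    (h : PySem.List.index? P v = some k) : k < P.length := by
  obtain ⟨hk, -, -⟩ := PySem.List.getElem_of_index?_eq_some h
  exact hk

-- ===== VERDICT (by name: the statement is the Claim_ definition above) =====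
theorem is_forward_edge_spec : Claim_equal_is_forward_edge := by
  intro edge cs _hdom hpre
  unfold Spec_is_forward_edge is_forward_edge is_forward_edge_alt
  rw [PySem.List.slice_from_one, pvAGo_eq, List.drop_zero, pvRes]
  cases hf : PySem.List.index? (cs.zip cs.tail) edge with
  | some f =>
    have hf' := pv_idx_lt _ _ _ hf
    cases hb : PySem.List.index? (cs.zip cs.tail) (edge.2, edge.1) with
    | none =>
      simp only [hf, hb]
      rw [if_pos (Or.inl hf')]
      have hlen : (cs.zip cs.tail).length = cs.length - 1 := by
        simp [List.length_zip, List.length_tail]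
      simp
      omega
    | some b =>
      simp only [hf, hb]
      rw [if_pos (Or.inl hf')]
  | none =>
    cases hb : PySem.List.index? (cs.zip cs.tail) (edge.2, edge.1) with
    | some b =>
      have hb' := pv_idx_lt _ _ _ hb
      simp only [hf, hb]
      rw [if_pos (Or.inr hb')]
      have hlen : (cs.zip cs.tail).length = cs.length - 1 := by
        simp [List.length_zip, List.length_tail]
      simp
      omega
    | none =>
      simp only [hf, hb]
      rw [if_neg (by omega)]
      obtain ⟨last, hlast⟩ : ∃ l, PySem.List.pyGet? cs (-1) = some l := by
        rw [PySem.List.pyGet?_neg_one]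
        cases h : cs.getLast? with
        | none => exact absurd (List.getLast?_eq_none_iff.mp h) hpre
        | some l => exact ⟨l, rfl⟩
      obtain ⟨first, hfirst⟩ : ∃ fv, PySem.List.pyGet? cs 0 = some fv := by
        rw [PySem.List.pyGet?_zero]
        cases h : cs[0]? with
        | none => exact ⟨0, by cases cs with | nil => exact absurd rfl hpre | cons a t => simp at h⟩
        | some fv => exact ⟨fv, rfl⟩
      rw [hlast, hfirst]
      by_cases h1 : edge = (last, first)
      · simp [h1]
      · by_cases h2 : edge = (first, last) <;> simp [h1, h2]
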